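-- pv_equiv track=rewrite | github.com/krzysztof-turowski/programming-contests | google-code-jam/2020-round-1a/pattern_matching.py | solve
-- ===== SOURCE A (Python) =====
-- def match(t, words):
--     if not t.startswith(words[0]):
--         return False
--     if not t[::-1].startswith(words[-1][::-1]):
--         return False
--     t = t[len(words[0]):len(t) - len(words[-1])]
--     for w in words[1:-1]:
--         index = t.find(w)
--         if index == -1 or index + len(w) > len(t):
--             return False
--         t = t[index + len(w):]
--     return True
--
-- def merge(t, w):
--     if t.startswith(w):
--         return t, True
--     if w.startswith(t):
--         return w, True
--     return None, False
--
-- def solve(M):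
--     M = sorted(M, key = len)
--     if len(M[0]) == 1:
--         for words in M:
--             if not match(M[0][0], words):
--                 return '*'
--         return M[0][0]
--     start, end = '', ''
--     for words in M:
--         start, possible_start = merge(start, words[0])
--         end, possible_end = merge(end, words[-1][::-1])
--         if not possible_start or not possible_end:
--             return '*'
--     return start + ''.join(''.join(words[1:-1]) for words in M) + end[::-1]
-- ===== SOURCE B (Python) =====
-- def match(t, words):
--     if not t.startswith(words[0]) or not t.endswith(words[-1]):
--         return False
--     core = t[len(words[0]):len(t) - len(words[-1])]
--     end = len(core)
--     for w in reversed(words[1:-1]):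
--         p = core.rfind(w, 0, end)
--         if p == -1:
--             return False
--         end = p
--     return True
--
-- def solve(M):
--     shortest = min(M, key=len)
--     if len(shortest) == 1:
--         s = shortest[0]
--         return s if all(match(s, ws) for ws in M) else '*'
--     starts = [ws[0] for ws in M]
--     ends = [ws[-1] for ws in M]
--     longest_start = max(starts, key=len)
--     longest_end = max(ends, key=len)
--     if not all(longest_start.startswith(w) for w in starts):
--         return '*'
--     if not all(longest_end.endswith(w) for w in ends):
--         return '*'
--     middle = ''.join(w for ws in sorted(M, key=len) for w in ws[1:-1])
--     return longest_start + middle + longest_end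
-- ===== Notes on version B (the rewrite author's own statement) =====
-- stated objective: alternative
-- what changed: The middle-segment matcher now consumes the words RIGHT-TO-LEFT, repeatedly taking the RIGHTMOST occurrence with core.rfind(w, 0, end) and shrinking the right bound (A scans left-to-right taking leftmost occurrences with find and re-slicing), which needs an order-invariance argument; the sort-plus-iterative-merge fold is replaced by max(key=len) plus prefix/suffix checks over all first/last segments (no string reversal), and the single-word branch uses min(key=len) and all() instead of sorting with an early-return loop.
import Mathlib
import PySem

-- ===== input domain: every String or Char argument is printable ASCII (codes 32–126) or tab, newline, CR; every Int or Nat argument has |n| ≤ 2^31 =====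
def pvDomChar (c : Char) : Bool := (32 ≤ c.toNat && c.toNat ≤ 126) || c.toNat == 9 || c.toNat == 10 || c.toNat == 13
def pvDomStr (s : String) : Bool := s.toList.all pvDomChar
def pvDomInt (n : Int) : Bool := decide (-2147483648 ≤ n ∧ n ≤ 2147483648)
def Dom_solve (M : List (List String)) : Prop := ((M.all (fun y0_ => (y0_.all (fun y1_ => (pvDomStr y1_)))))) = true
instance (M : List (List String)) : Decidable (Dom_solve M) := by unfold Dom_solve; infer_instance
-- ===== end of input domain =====

-- B matches the middle segments RIGHT-TO-LEFT via rightmost occurrences (rfind with a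
-- shrinking right bound) instead of A's left-to-right leftmost-find consume loop, and
-- replaces the sort-plus-merge fold by max(key=len) with prefix/suffix checks; alternative
-- decomposition, same asymptotic cost.

-- ===== PORT A =====
-- t[::-1]
def pyRev (s : String) : String := (PySem.Str.slice? s none none (-1)).getD ""

-- the 'for w in words[1:-1]' consume loop of match
def matchLoopA (t : String) : List String → Bool
  | [] => true
  | w :: rest =>
    let index := PySem.Str.find t w
    if index = -1 ∨ index + (PySem.Str.len w : Int) > (PySem.Str.len t : Int) then false
    else matchLoopA (PySem.Str.slice t (some (index + (PySem.Str.len w : Int))) none) rest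

def matchA (t : String) (words : List String) : Bool :=
  let w0 := (PySem.List.pyGet? words 0).getD ""       -- words[0]; none (IndexError) unreachable under Pre_solve
  let wl := (PySem.List.pyGet? words (-1)).getD ""    -- words[-1]; likewise
  if ¬ PySem.Str.startswith t w0 then false
  else if ¬ PySem.Str.startswith (pyRev t) (pyRev wl) then false
  else matchLoopA
    (PySem.Str.slice t (some ((PySem.Str.len w0 : Int))) (some ((PySem.Str.len t : Int) - (PySem.Str.len wl : Int))))
    (PySem.List.slice words (some 1) (some (-1)))

-- merge returns (None, False) on failure: encoded as none (the bool is determined by the option)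
def mergeA (t w : String) : Option String :=
  if PySem.Str.startswith t w then some t
  else if PySem.Str.startswith w t then some w
  else none

-- the first branch's 'for words in M: if not match: return *' loop
def loopMatchA (s : String) : List (List String) → Bool
  | [] => true
  | ws :: rest => if ¬ matchA s ws then false else loopMatchA s rest

-- the second branch's loop over M updating (start, end), early '*' on failure
def loopMergeA (s e : String) : List (List String) → Option (String × String)
  | [] => some (s, e)
  | ws :: rest =>
    match mergeA s ((PySem.List.pyGet? ws 0).getD ""),
          mergeA e (pyRev ((PySem.List.pyGet? ws (-1)).getD "")) with
    | some s', some e' => loopMergeA s' e' rest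
    | _, _ => none

def solve (M : List (List String)) : String :=
  let Ms := PySem.List.sorted M (fun ws => (ws.length : Int)) false
  let first := (PySem.List.pyGet? Ms 0).getD []       -- M[0]; none (IndexError) unreachable under Pre_solve
  if first.length = 1 then
    let s := (PySem.List.pyGet? first 0).getD ""
    if loopMatchA s Ms then s else "*"
  else
    match loopMergeA "" "" Ms with
    | none => "*"
    | some (st, en) =>
      st ++ PySem.Str.join "" (Ms.map (fun ws => PySem.Str.join "" (PySem.List.slice ws (some 1) (some (-1))))) ++ pyRev en

-- ===== PORT B =====
-- the 'for w in reversed(words[1:-1])' loop: p = core.rfind(w, 0, end); end = p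
def backLoop (core : String) : Int → List String → Bool
  | _, [] => true
  | e, w :: rest =>
    let p := PySem.Str.rfindFrom core w 0 (some e)
    if p = -1 then false else backLoop core p rest

def matchB (t : String) (words : List String) : Bool :=
  let w0 := (PySem.List.pyGet? words 0).getD ""       -- words[0]; none unreachable under Pre_solve
  let wl := (PySem.List.pyGet? words (-1)).getD ""
  if ¬ PySem.Str.startswith t w0 ∨ ¬ PySem.Str.endswith t wl then false
  else
    let core := PySem.Str.slice t (some ((PySem.Str.len w0 : Int)))
      (some ((PySem.Str.len t : Int) - (PySem.Str.len wl : Int)))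
    backLoop core ((PySem.Str.len core : Int)) (PySem.List.slice words (some 1) (some (-1))).reverse

def solve_alt (M : List (List String)) : String :=
  match PySem.List.min? M (fun ws => (ws.length : Int)) with
  | none => ""   -- unreachable: min([]) raises ValueError, excluded by Pre_solve
  | some shortest =>
    if shortest.length = 1 then
      let s := (PySem.List.pyGet? shortest 0).getD ""
      if M.all (fun ws => matchB s ws) then s else "*"
    else
      let starts := M.map (fun ws => (PySem.List.pyGet? ws 0).getD "")
      let lasts := M.map (fun ws => (PySem.List.pyGet? ws (-1)).getD "")
      match PySem.List.max? starts (fun w => (PySem.Str.len w : Int)),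
            PySem.List.max? lasts (fun w => (PySem.Str.len w : Int)) with
      | some ls, some le =>
        if ¬ starts.all (fun w => PySem.Str.startswith ls w) then "*"
        else if ¬ lasts.all (fun w => PySem.Str.endswith le w) then "*"
        else ls ++ PySem.Str.join ""
          ((PySem.List.sorted M (fun ws => (ws.length : Int)) false).flatMap
            (fun ws => PySem.List.slice ws (some 1) (some (-1)))) ++ le
      | _, _ => ""  -- unreachable: max([]) only when M = [], excluded by Pre_solve

-- ===== PRECONDITION & SPEC =====
-- Pre_solve excludes exactly the inputs where the Python raises IndexError/ValueError:
-- the empty pattern list (M[0] / min(M)) and patterns with no words (words[0] / words[-1]).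
def Pre_solve (M : List (List String)) : Prop := M ≠ [] ∧ ∀ ws ∈ M, ws ≠ []
instance (M : List (List String)) : Decidable (Pre_solve M) := by unfold Pre_solve; infer_instance
def pvWitness_solve : List (List String) := [["ab", "b"], ["a"]]

def Spec_solve (M : List (List String)) (out : String) : Prop := out = solve_alt M
instance (M : List (List String)) (out : String) : Decidable (Spec_solve M out) := by unfold Spec_solve; infer_instance

-- ===== CLAIM (what is proved, stated in full; the proofs are below) =====
def Claim_equal_solve : Prop := ∀ (M : List (List String)), Dom_solve M → Pre_solve M → Spec_solve M (solve M)

-- ===== LEMMAS AND PROOFS =====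
def Embeds : List (List Char) → List Char → Prop
  | [], _ => True
  | w :: ws, t => ∃ i : Nat, i + w.length ≤ t.length ∧ w <+: t.drop i ∧ Embeds ws (t.drop (i + w.length))

theorem embeds_shift (ws : List (List Char)) (u t : List Char) (h : Embeds ws t) :
    Embeds ws (u ++ t) := by
  cases ws with
  | nil => trivial
  | cons w rest =>
    obtain ⟨i, hb, hp, hr⟩ := h
    refine ⟨u.length + i, by simp; omega, ?_, ?_⟩
    · rw [List.drop_append, List.drop_eq_nil_of_le (by omega : u.length ≤ u.length + i)]
      simpa using hp
    · rw [show u.length + i + w.length = u.length + (i + w.length) by omega, List.drop_append,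
        List.drop_eq_nil_of_le (by omega : u.length ≤ u.length + (i + w.length))]
      simpa using hr

theorem embeds_extend (ws : List (List Char)) (t u : List Char) (h : Embeds ws t) :
    Embeds ws (t ++ u) := by
  induction ws generalizing t with
  | nil => trivial
  | cons w rest ih =>
    obtain ⟨i, hb, hp, hr⟩ := h
    refine ⟨i, by simp; omega, ?_, ?_⟩
    · rw [List.drop_append_of_le_length (by omega)]
      exact hp.trans (List.prefix_append _ _)
    · rw [List.drop_append_of_le_length hb]
      exact ih _ hr

theorem prefix_drop_take (t w : List Char) (p e : Nat) (hpe : p ≤ e) :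
    (w <+: (t.take e).drop p) ↔ (w <+: t.drop p ∧ p + w.length ≤ e) := by
  rw [List.drop_take, List.prefix_take_iff]
  exact ⟨fun ⟨h1, h2⟩ => ⟨h1, by omega⟩, fun ⟨h1, h2⟩ => ⟨h1, by omega⟩⟩

theorem embeds_append_singleton (ws : List (List Char)) (w : List Char) (t : List Char) :
    Embeds (ws ++ [w]) t ↔
      ∃ p : Nat, p + w.length ≤ t.length ∧ w <+: t.drop p ∧ Embeds ws (t.take p) := by
  induction ws generalizing t with
  | nil =>
    simp only [List.nil_append]
    constructor
    · rintro ⟨i, hb, hp, -⟩; exact ⟨i, hb, hp, trivial⟩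
    · rintro ⟨p, hb, hp, -⟩; exact ⟨p, hb, hp, trivial⟩
  | cons v ws' ih =>
    constructor
    · rintro ⟨i, hb, hp, hr⟩
      obtain ⟨p', hb', hp', hws'⟩ := (ih _).mp hr
      rw [List.length_drop] at hb'
      refine ⟨i + v.length + p', by omega, ?_, ?_⟩
      · rw [show i + v.length + p' = (i + v.length) + p' by ring, ← List.drop_drop]
        exact hp'
      · refine ⟨i, ?_, ?_, ?_⟩
        · rw [List.length_take]; omega
        · rw [prefix_drop_take _ _ _ _ (by omega)]
          exact ⟨hp, by omega⟩
        · rw [List.drop_take]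
          have : i + v.length + p' - (i + v.length) = p' := by omega
          rw [this]
          exact hws'
    · rintro ⟨p, hb, hp, ⟨i, hbi, hpi, hri⟩⟩
      rw [List.length_take] at hbi
      refine ⟨i, by omega, ?_, ?_⟩
      · rw [prefix_drop_take _ _ _ _ (by omega)] at hpi
        exact hpi.1
      · refine (ih _).mpr ⟨p - (i + v.length), ?_, ?_, ?_⟩
        · rw [List.length_drop]; omega
        · rw [List.drop_drop, show i + v.length + (p - (i + v.length)) = p by omega]
          exact hp
        · rw [List.drop_take] at hri
          exact hri

theorem rfindGo_spec (s w : List Char) (j : Nat) :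
    (PySem.Chars.rfind.go s w j = -1 ∧ ∀ i ≤ j, ¬ w <+: s.drop i) ∨
    (∃ k : Nat, PySem.Chars.rfind.go s w j = (k : Int) ∧ k ≤ j ∧ w <+: s.drop k ∧
      ∀ i, k < i → i ≤ j → ¬ w <+: s.drop i) := by
  induction j with
  | zero =>
    by_cases h : w <+: s
    · exact Or.inr ⟨0, by simp [PySem.Chars.rfind.go, List.isPrefixOf_iff_prefix, h], by omega,
        by simpa using h, fun i h1 h2 => by omega⟩
    · exact Or.inl ⟨by simp [PySem.Chars.rfind.go, List.isPrefixOf_iff_prefix, h],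
        fun i hi => by interval_cases i; simpa using h⟩
  | succ j ih =>
    by_cases h : w <+: s.drop (j + 1)
    · exact Or.inr ⟨j + 1, by simp [PySem.Chars.rfind.go, List.isPrefixOf_iff_prefix, h],
        le_refl _, h, fun i h1 h2 => by omega⟩
    · have hgo : PySem.Chars.rfind.go s w (j + 1) = PySem.Chars.rfind.go s w j := by
        simp [PySem.Chars.rfind.go, List.isPrefixOf_iff_prefix, h]
      rcases ih with ⟨h1, h2⟩ | ⟨k, h1, h2, h3, h4⟩
      · refine Or.inl ⟨hgo ▸ h1, fun i hi => ?_⟩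
        rcases Nat.lt_succ_iff_lt_or_eq.mp (Nat.lt_succ_of_le hi) with hlt | rfl
        · exact h2 i (by omega)
        · exact h
      · refine Or.inr ⟨k, hgo ▸ h1, by omega, h3, fun i hki hi => ?_⟩
        rcases Nat.lt_succ_iff_lt_or_eq.mp (Nat.lt_succ_of_le hi) with hlt | rfl
        · exact h4 i hki (by omega)
        · exact h

theorem rfindFrom_nat_cases (s w : List Char) (e : Nat) (he : e ≤ s.length) :
    (PySem.Chars.rfindFrom s w 0 (some (e : Int)) = -1 ∧
      ∀ p : Nat, p + w.length ≤ e → ¬ w <+: s.drop p) ∨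
    (∃ k : Nat, PySem.Chars.rfindFrom s w 0 (some (e : Int)) = (k : Int) ∧
      k + w.length ≤ e ∧ w <+: s.drop k ∧
      ∀ p : Nat, k < p → p + w.length ≤ e → ¬ w <+: s.drop p) := by
  have hlen : (s.take e).length = e := by rw [List.length_take]; omega
  have hred : PySem.Chars.rfindFrom s w 0 (some (e : Int)) =
      (if PySem.Chars.rfind.go (s.take e) w e = -1 then -1
       else PySem.Chars.rfind.go (s.take e) w e) := by
    simp only [PySem.Chars.rfindFrom, PySem.Chars.rfind]
    have h1 : ¬ ((s.length : Int) < (e : Int)) := by exact_mod_cast not_lt.mpr (by exact_mod_cast he)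
    have h2 : ¬ ((e : Int) < 0) := by omega
    simp only [if_neg h1, if_neg h2]
    norm_num
    rw [if_neg h2, Nat.min_eq_left he]
  rw [hred]
  have := rfindGo_spec (s.take e) w e
  rcases this with ⟨h1, h2⟩ | ⟨k, h1, h2, h3, h4⟩
  · refine Or.inl ⟨by rw [h1]; simp, fun p hp => ?_⟩
    have hnp := h2 p (by omega)
    intro hc
    exact hnp ((prefix_drop_take s w p e (by omega)).mpr ⟨hc, hp⟩)
  · have hkw : k + w.length ≤ e := by
      have := h3.length_le
      rw [List.length_drop, hlen] at this
      omega
    have h3' : w <+: s.drop k ∧ k + w.length ≤ e :=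
      (prefix_drop_take s w k e (by omega)).mp h3
    refine Or.inr ⟨k, by rw [h1]; simp, hkw, h3'.1, fun p hkp hp => ?_⟩
    intro hc
    exact h4 p hkp (by omega) ((prefix_drop_take s w p e (by omega)).mpr ⟨hc, hp⟩)

theorem toList_slice_from (s : String) (k : Nat) :
    (PySem.Str.slice s (some (k : Int)) none).toList = s.toList.drop k := by
  rw [PySem.Str.toList_slice]
  simp [PySem.List.slice_from_natCast]

theorem matchLoopA_iff (mids : List String) : ∀ (t : String),
    (matchLoopA t mids = true ↔ Embeds (mids.map String.toList) t.toList) := by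
  induction mids with
  | nil => intro t; simp [matchLoopA, Embeds]
  | cons w rest ih =>
    intro t
    simp only [matchLoopA, List.map_cons]
    by_cases hneg : PySem.Str.find t w = -1
    · rw [if_pos (Or.inl hneg)]
      simp only [Bool.false_eq_true, false_iff]
      rintro ⟨i, hb, hp, -⟩
      rw [PySem.Str.find_eq, PySem.Chars.find_eq_neg_one_iff] at hneg
      exact hneg (hp.isInfix.trans (List.drop_suffix i t.toList).isInfix)
    · have hge : 0 ≤ PySem.Chars.find t.toList w.toList := by
        rw [PySem.Str.find_eq] at hneg
        have := PySem.Chars.neg_one_le_find t.toList w.toList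
        omega
      obtain ⟨hpre, hmin⟩ := PySem.Chars.find_spec hge
      have hle := PySem.Chars.find_le_length t.toList w.toList
      have hfit : (PySem.Chars.find t.toList w.toList).toNat + w.toList.length ≤ t.toList.length := by
        have h1 := hpre.length_le
        rw [List.length_drop] at h1
        omega
      have hguard : ¬ (PySem.Str.find t w = -1 ∨
          PySem.Str.find t w + (PySem.Str.len w : Int) > (PySem.Str.len t : Int)) := by
        rw [PySem.Str.find_eq, PySem.Str.len_eq, PySem.Str.len_eq]
        rw [not_or]
        exact ⟨by omega, by omega⟩
      rw [if_neg hguard]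
      set k : Nat := (PySem.Chars.find t.toList w.toList).toNat + w.toList.length with hk
      clear_value k
      have hcast : PySem.Str.find t w + (PySem.Str.len w : Int) = (k : Int) := by
        rw [PySem.Str.find_eq, PySem.Str.len_eq, hk]
        push_cast
        omega
      rw [hcast, ih _]
      have htl : (PySem.Str.slice t (some (k : Int)) none).toList = t.toList.drop k :=
        toList_slice_from t k
      rw [htl]
      constructor
      · intro hr
        rw [hk] at hr
        exact ⟨(PySem.Chars.find t.toList w.toList).toNat, by omega, hpre, hr⟩
      · rintro ⟨i, hb, hp, hr⟩
        have hki : (PySem.Chars.find t.toList w.toList).toNat ≤ i := by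
          by_contra hc
          exact hmin i (by omega) hp
        have hsplit : t.toList.drop k =
            (t.toList.drop k).take (i + w.toList.length - k) ++ t.toList.drop (i + w.toList.length) := by
          have h1 : t.toList.drop (i + w.toList.length) =
              (t.toList.drop k).drop (i + w.toList.length - k) := by
            rw [List.drop_drop]
            congr 1
            omega
          rw [h1, List.take_append_drop]
        rw [hsplit]
        exact embeds_shift _ _ _ hr

theorem backLoop_iff (core : String) (rev : List String) : ∀ (e : Nat),
    e ≤ core.toList.length →
    (backLoop core (e : Int) rev = true ↔
      Embeds ((rev.reverse).map String.toList) (core.toList.take e)) := by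
  induction rev with
  | nil => intro e he; simp [backLoop, Embeds]
  | cons w rest ih =>
    intro e he
    have htake : (core.toList.take e).length = e := by rw [List.length_take]; omega
    simp only [backLoop, PySem.Str.rfindFrom_eq, List.reverse_cons, List.map_append,
      List.map_cons, List.map_nil]
    rw [embeds_append_singleton]
    rcases rfindFrom_nat_cases core.toList w.toList e he with ⟨h1, h2⟩ | ⟨k, h1, h2, h3, h4⟩
    · rw [h1, if_pos rfl]
      simp only [Bool.false_eq_true, false_iff]
      rintro ⟨p, hpb, hpp, -⟩
      rw [htake] at hpb
      rw [prefix_drop_take _ _ _ _ (by omega)] at hpp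
      exact h2 p hpb hpp.1
    · rw [h1, if_neg (by omega)]
      rw [ih k (by omega)]
      constructor
      · intro hr
        refine ⟨k, by omega, ?_, ?_⟩
        · rw [prefix_drop_take _ _ _ _ (by omega)]
          exact ⟨h3, h2⟩
        · rw [List.take_take, Nat.min_eq_left (by omega)]
          exact hr
      · rintro ⟨p, hpb, hpp, hpe⟩
        rw [htake] at hpb
        rw [prefix_drop_take _ _ _ _ (by omega)] at hpp
        have hpk : p ≤ k := by
          by_contra hc
          exact h4 p (by omega) hpb hpp.1
        rw [List.take_take, Nat.min_eq_left (by omega)] at hpe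
        have hsplit : core.toList.take k =
            core.toList.take p ++ (core.toList.take k).drop p := by
          have h5 := (List.take_append_drop p (core.toList.take k)).symm
          rwa [List.take_take, Nat.min_eq_left hpk] at h5
        rw [hsplit]
        exact embeds_extend _ _ _ hpe
-- the start-merge (resp. end-merge) component of loopMergeA on its own
def foldMergeA (s : String) : List String → Option String
  | [] => some s
  | w :: rest =>
    match mergeA s w with
    | some s' => foldMergeA s' rest
    | none => none

theorem loopMergeA_eq (l : List (List String)) : ∀ (s e : String),
    loopMergeA s e l =
      match foldMergeA s (l.map (fun ws => (PySem.List.pyGet? ws 0).getD "")),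
            foldMergeA e (l.map (fun ws => pyRev ((PySem.List.pyGet? ws (-1)).getD ""))) with
      | some a, some b => some (a, b)
      | _, _ => none := by
  induction l with
  | nil => intro s e; rfl
  | cons ws rest ih =>
    intro s e
    simp only [loopMergeA, List.map_cons, foldMergeA]
    cases mergeA s ((PySem.List.pyGet? ws 0).getD "") with
    | none => cases mergeA e (pyRev ((PySem.List.pyGet? ws (-1)).getD "")) <;> simp
    | some s' =>
      cases mergeA e (pyRev ((PySem.List.pyGet? ws (-1)).getD "")) with
      | none => cases h : foldMergeA s' (rest.map (fun ws => (PySem.List.pyGet? ws 0).getD "")) <;> simp [h]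
      | some e' => exact ih s' e'

theorem startswith_iff_prefix (t w : String) :
    PySem.Str.startswith t w = true ↔ w.toList <+: t.toList := by
  simp [PySem.Chars.startswith_iff]

theorem endswith_iff_suffix (t w : String) :
    PySem.Str.endswith t w = true ↔ w.toList <:+ t.toList := by
  simp [PySem.Chars.endswith_iff]

theorem toList_pyRev (s : String) : (pyRev s).toList = s.toList.reverse := by
  simp [pyRev, PySem.Str.slice?_none_none_neg_one]

theorem strLen_eq (s : String) : PySem.Str.len s = s.toList.length := by
  simp

theorem mergeA_some {t w r : String} (h : mergeA t w = some r) :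
    (r = t ∧ w.toList <+: t.toList) ∨ (r = w ∧ t.toList <+: w.toList) := by
  unfold mergeA at h
  split_ifs at h with h1 h2
  · exact Or.inl ⟨(Option.some.injEq _ _ ▸ h).symm, (startswith_iff_prefix t w).mp h1⟩
  · exact Or.inr ⟨(Option.some.injEq _ _ ▸ h).symm, (startswith_iff_prefix w t).mp h2⟩

theorem mergeA_some_of_comparable {t w : String}
    (h : t.toList <+: w.toList ∨ w.toList <+: t.toList) : ∃ r, mergeA t w = some r := by
  unfold mergeA
  split_ifs with h1 h2
  · exact ⟨t, rfl⟩
  · exact ⟨w, rfl⟩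
  · rcases h with h | h
    · exact absurd ((startswith_iff_prefix w t).mpr h) h2
    · exact absurd ((startswith_iff_prefix t w).mpr h) h1

theorem foldMergeA_some (l : List String) : ∀ (acc r : String), foldMergeA acc l = some r →
    acc.toList <+: r.toList ∧ (∀ w ∈ l, w.toList <+: r.toList) ∧ (r = acc ∨ r ∈ l) := by
  induction l with
  | nil =>
    intro acc r h
    simp only [foldMergeA, Option.some.injEq] at h
    subst h
    simp
  | cons w rest ih =>
    intro acc r h
    simp only [foldMergeA] at h
    cases hm : mergeA acc w with
    | none => rw [hm] at h; cases h
    | some s' =>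
      rw [hm] at h
      obtain ⟨h1, h2, h3⟩ := ih s' r h
      rcases mergeA_some hm with ⟨rfl, hpw⟩ | ⟨rfl, hpa⟩
      · exact ⟨h1, fun x hx => by
          rcases List.mem_cons.mp hx with rfl | hx
          · exact hpw.trans h1
          · exact h2 x hx,
          by rcases h3 with rfl | h3
             · exact Or.inl rfl
             · exact Or.inr (List.mem_cons_of_mem _ h3)⟩
      · refine ⟨hpa.trans h1, fun x hx => ?_, ?_⟩
        · rcases List.mem_cons.mp hx with rfl | hx
          · exact h1
          · exact h2 x hx
        · rcases h3 with rfl | h3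
          · exact Or.inr (List.mem_cons_self)
          · exact Or.inr (List.mem_cons_of_mem _ h3)

theorem foldMergeA_of_chain (l : List String) (X : List Char) : ∀ (acc : String),
    acc.toList <+: X → (∀ w ∈ l, w.toList <+: X) → ∃ r, foldMergeA acc l = some r := by
  induction l with
  | nil => intro acc _ _; exact ⟨acc, rfl⟩
  | cons w rest ih =>
    intro acc hacc hl
    obtain ⟨s', hs'⟩ := mergeA_some_of_comparable
      (List.prefix_or_prefix_of_prefix hacc (hl w List.mem_cons_self))
    have hs'X : s'.toList <+: X := by
      rcases mergeA_some hs' with ⟨heq, _⟩ | ⟨heq, _⟩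
      · rw [heq]; exact hacc
      · rw [heq]; exact hl w List.mem_cons_self
    obtain ⟨r, hr⟩ := ih s' hs'X (fun x hx => hl x (List.mem_cons_of_mem _ hx))
    exact ⟨r, by simp only [foldMergeA, hs', hr]⟩

theorem eq_of_prefix_of_len_le {a b : String} (h : a.toList <+: b.toList)
    (hlen : b.toList.length ≤ a.toList.length) : a = b :=
  String.toList_inj.mp (List.IsPrefix.eq_of_length h (le_antisymm h.length_le hlen))

theorem foldMergeA_eq_of_max (l l' : List String) (hp : l.Perm l') (L : String)
    (hL : PySem.List.max? l' (fun w => (PySem.Str.len w : Int)) = some L) :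
    foldMergeA "" l =
      if l'.all (fun w => PySem.Str.startswith L w) then some L else none := by
  have hLmem : L ∈ l := hp.mem_iff.mpr (PySem.List.max?_mem hL)
  have hmax : ∀ w ∈ l, w.toList.length ≤ L.toList.length := by
    intro w hw
    have := PySem.List.max?_isMax hL w (hp.mem_iff.mp hw)
    simpa using this
  split_ifs with hcond
  · -- every element is a prefix of L; the fold returns L
    have hall : ∀ w ∈ l, w.toList <+: L.toList := by
      intro w hw
      exact (startswith_iff_prefix L w).mp
        (by exact List.all_eq_true.mp hcond w (hp.mem_iff.mp hw))
    obtain ⟨r, hr⟩ := foldMergeA_of_chain l L.toList "" (List.nil_prefix) hall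
    obtain ⟨_, h2, h3⟩ := foldMergeA_some l "" r hr
    have hLr : L.toList <+: r.toList := by
      rcases h3 with rfl | h3
      · have := h2 L hLmem
        simpa using this
      · exact (h2 L hLmem).trans (List.prefix_rfl)
    rcases h3 with heq | h3
    · -- r = "": then L = "" too
      have hLnil : L.toList = [] := List.prefix_nil.mp (by rw [heq] at hLr; simpa using hLr)
      have : r = L := by rw [heq]; exact (String.toList_inj.mp (by simp [hLnil])).symm
      rw [hr, this]
    · rw [hr]; exact congrArg some (eq_of_prefix_of_len_le hLr (hmax r h3)).symm
  · -- some element is not a prefix of L; the fold fails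
    cases hr : foldMergeA "" l with
    | none => rfl
    | some r =>
      exfalso
      obtain ⟨_, h2, h3⟩ := foldMergeA_some l "" r hr
      have hrL : r = L := by
        rcases h3 with heq | h3
        · have hLnil : L.toList = [] := List.prefix_nil.mp (by
            have := h2 L hLmem; rw [heq] at this; simpa using this)
          rw [heq]; exact (String.toList_inj.mp (by simp [hLnil])).symm
        · exact (eq_of_prefix_of_len_le (h2 L hLmem) (hmax r h3)).symm
      apply hcond
      refine List.all_eq_true.mpr (fun w hw => ?_)
      exact (startswith_iff_prefix L w).mpr (hrL ▸ h2 w (hp.mem_iff.mpr hw))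

theorem head?_insertBy {α : Type} (before : α → α → Bool) (x : α) (l : List α) :
    (PySem.List.insertBy before x l).head? =
      some (match l with
            | [] => x
            | y :: _ => if before x y then x else y) := by
  cases l with
  | nil => rfl
  | cons y ys =>
    simp only [PySem.List.insertBy]
    split_ifs with h <;> simp

def minStep {α : Type} (key : α → Int) (acc : Option α) (x : α) : Option α :=
  match acc with
  | none => some x
  | some m => if key x < key m then some x else some m

theorem min?_eq_foldl_minStep {α : Type} (xs : List α) (key : α → Int) :
    PySem.List.min? xs key = xs.foldl (minStep key) none := rfl

theorem min?_append_singleton {α : Type} (ys : List α) (x : α) (key : α → Int) :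
    PySem.List.min? (ys ++ [x]) key =
      some (match PySem.List.min? ys key with
            | none => x
            | some m => if key x < key m then x else m) := by
  rw [min?_eq_foldl_minStep, List.foldl_append, List.foldl_cons, List.foldl_nil,
    ← min?_eq_foldl_minStep]
  cases PySem.List.min? ys key with
  | none => rfl
  | some m => simp only [minStep]; split_ifs <;> rfl

theorem head?_sorted_eq_min? {α : Type} (xs : List α) (key : α → Int) :
    (PySem.List.sorted xs key false).head? = PySem.List.min? xs key := by
  induction xs using List.reverseRecOn with
  | nil => rfl
  | append_singleton ys x ih =>
    rw [PySem.List.sorted_eq_foldl_insertBy] at ih ⊢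
    rw [List.foldl_append, List.foldl_cons, List.foldl_nil, min?_append_singleton,
      head?_insertBy]
    cases hS : List.foldl
        (fun acc x => PySem.List.insertBy (fun a b => decide (key a < key b)) x acc) [] ys with
    | nil =>
      rw [hS] at ih
      simp only [List.head?_nil] at ih
      rw [← ih]
    | cons y t =>
      rw [hS] at ih
      simp only [List.head?_cons] at ih
      rw [← ih]
      dsimp only
      split_ifs with h1 h2 h2 <;> first | rfl | simp_all

theorem matchLoopA_eq_backLoop (core : String) (mids : List String) :
    matchLoopA core mids = backLoop core ((PySem.Str.len core : Int)) mids.reverse := by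
  have h := backLoop_iff core mids.reverse core.toList.length (le_refl _)
  rw [List.reverse_reverse, List.take_length] at h
  rw [Bool.eq_iff_iff, matchLoopA_iff,
    show (PySem.Str.len core : Int) = ((core.toList.length : Nat) : Int) by simp, h]

theorem matchA_eq_matchB (t : String) (ws : List String) : matchA t ws = matchB t ws := by
  simp only [matchA, matchB]
  have hend : PySem.Str.startswith (pyRev t)
      (pyRev ((PySem.List.pyGet? ws (-1)).getD "")) =
      PySem.Str.endswith t ((PySem.List.pyGet? ws (-1)).getD "") := by
    rw [Bool.eq_iff_iff, startswith_iff_prefix, endswith_iff_suffix, toList_pyRev, toList_pyRev,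
      List.reverse_prefix]
  rw [hend]
  by_cases hs : PySem.Str.startswith t ((PySem.List.pyGet? ws 0).getD "") = true
  · by_cases he : PySem.Str.endswith t ((PySem.List.pyGet? ws (-1)).getD "") = true
    · rw [if_neg (by simpa using hs), if_neg (by simpa using he),
        if_neg (by simp; exact ⟨by simpa using hs, by simpa using he⟩)]
      exact matchLoopA_eq_backLoop _ _
    · rw [if_neg (by simpa using hs), if_pos he, if_pos (Or.inr he)]
  · rw [if_pos hs, if_pos (Or.inl hs)]

theorem loopMatchA_eq_all (s : String) (l : List (List String)) :
    loopMatchA s l = l.all (fun ws => matchA s ws) := by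
  induction l with
  | nil => rfl
  | cons ws rest ih =>
    simp only [loopMatchA, List.all_cons, ih]
    by_cases h : matchA s ws <;> simp [h]

def maxStep {α : Type} (key : α → Int) (acc : Option α) (x : α) : Option α :=
  match acc with
  | none => some x
  | some m => if key m < key x then some x else some m

theorem max?_eq_foldl_maxStep {α : Type} (xs : List α) (key : α → Int) :
    PySem.List.max? xs key = xs.foldl (maxStep key) none := rfl

theorem foldl_maxStep_map {α β : Type} (f : α → β) (key : β → Int) :
    ∀ (xs : List α) (acc : Option α),
    (xs.map f).foldl (maxStep key) (acc.map f) =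
      (xs.foldl (maxStep (fun x => key (f x))) acc).map f := by
  intro xs
  induction xs with
  | nil => intro acc; rfl
  | cons x rest ih =>
    intro acc
    have hstep : maxStep key (acc.map f) (f x) = (maxStep (fun y => key (f y)) acc x).map f := by
      cases acc with
      | none => rfl
      | some m => simp only [Option.map_some, maxStep]; split_ifs <;> rfl
    simp only [List.map_cons, List.foldl_cons, hstep]
    exact ih _

theorem max?_map {α β : Type} (f : α → β) (key : β → Int) (xs : List α) :
    PySem.List.max? (xs.map f) key = (PySem.List.max? xs (fun x => key (f x))).map f := by
  rw [max?_eq_foldl_maxStep, max?_eq_foldl_maxStep]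
  exact foldl_maxStep_map f key xs none

theorem len_pyRev (w : String) : PySem.Str.len (pyRev w) = PySem.Str.len w := by
  rw [strLen_eq, strLen_eq, toList_pyRev, List.length_reverse]

theorem pyRev_pyRev (s : String) : pyRev (pyRev s) = s :=
  String.toList_inj.mp (by rw [toList_pyRev, toList_pyRev, List.reverse_reverse])

theorem startswith_pyRev_eq_endswith (a b : String) :
    PySem.Str.startswith (pyRev a) (pyRev b) = PySem.Str.endswith a b := by
  rw [Bool.eq_iff_iff, startswith_iff_prefix, endswith_iff_suffix, toList_pyRev, toList_pyRev,
    List.reverse_prefix]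

theorem chars_join_nil_eq_flatten : ∀ (l : List (List Char)), PySem.Chars.join [] l = l.flatten := by
  intro l
  induction l with
  | nil => exact PySem.Chars.join_nil []
  | cons p rest ih =>
    cases rest with
    | nil => simp [PySem.Chars.join_singleton]
    | cons q rest' =>
      rw [PySem.Chars.join_cons_cons, List.flatten_cons, ← ih]
      simp

theorem join_map_eq_join_flatMap (g : List String → List String) (l : List (List String)) :
    PySem.Str.join "" (l.map (fun ws => PySem.Str.join "" (g ws))) =
      PySem.Str.join "" (l.flatMap g) := by
  apply String.toList_inj.mp
  rw [PySem.Str.toList_join, PySem.Str.toList_join]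
  have h0 : ("" : String).toList = [] := rfl
  rw [h0, chars_join_nil_eq_flatten, chars_join_nil_eq_flatten]
  induction l with
  | nil => rfl
  | cons ws rest ih =>
    simp only [List.map_cons, List.flatten_cons, List.flatMap_cons, List.map_append,
      List.flatten_append, ih, PySem.Str.toList_join, h0, chars_join_nil_eq_flatten]

-- ===== VERDICT (by name: the statement is the Claim_ definition above) =====
theorem solve_spec : Claim_equal_solve := by
  unfold Claim_equal_solve
  intro M _hDom hPre
  unfold Spec_solve
  obtain ⟨hne, -⟩ := hPre
  unfold solve solve_alt
  have hmin := head?_sorted_eq_min? M (fun ws => (ws.length : Int))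
  cases hm : PySem.List.min? M (fun ws => (ws.length : Int)) with
  | none => exact absurd ((PySem.List.min?_eq_none_iff M _).mp hm) hne
  | some shortest =>
    rw [hm] at hmin
    dsimp only
    obtain ⟨tl, hMs⟩ : ∃ tl,
        PySem.List.sorted M (fun ws => (ws.length : Int)) false = shortest :: tl := by
      cases hS : PySem.List.sorted M (fun ws => (ws.length : Int)) false with
      | nil => rw [hS] at hmin; cases hmin
      | cons a b =>
        rw [hS] at hmin
        simp only [List.head?_cons, Option.some.injEq] at hmin
        exact ⟨b, by rw [hmin]⟩
    have hfirst : (PySem.List.pyGet?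
        (PySem.List.sorted M (fun ws => (ws.length : Int)) false) 0).getD ([] : List String) =
        shortest := by
      rw [hMs]
      simp [PySem.List.pyGet?, PySem.List.pyIdx?]
    rw [hfirst]
    by_cases hlen1 : shortest.length = 1
    · rw [if_pos hlen1, if_pos hlen1, loopMatchA_eq_all]
      have hall : (PySem.List.sorted M (fun ws => (ws.length : Int)) false).all
          (fun ws => matchA ((PySem.List.pyGet? shortest 0).getD "") ws) =
          M.all (fun ws => matchB ((PySem.List.pyGet? shortest 0).getD "") ws) := by
        rw [Bool.eq_iff_iff, List.all_eq_true, List.all_eq_true]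
        constructor
        · intro h x hx
          rw [← matchA_eq_matchB]
          exact h x (by rw [PySem.List.mem_sorted]; exact hx)
        · intro h x hx
          rw [matchA_eq_matchB]
          exact h x (by rw [PySem.List.mem_sorted] at hx; exact hx)
      rw [hall]
    · rw [if_neg hlen1, if_neg hlen1]
      have hne0 : M.map (fun ws => (PySem.List.pyGet? ws 0).getD "") ≠ [] := by
        simpa using hne
      have hnel : M.map (fun ws => (PySem.List.pyGet? ws (-1)).getD "") ≠ [] := by
        simpa using hne
      cases hls : PySem.List.max? (M.map (fun ws => (PySem.List.pyGet? ws 0).getD ""))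
          (fun w => (PySem.Str.len w : Int)) with
      | none => exact absurd ((PySem.List.max?_eq_none_iff _ _).mp hls) hne0
      | some ls =>
      cases hle : PySem.List.max? (M.map (fun ws => (PySem.List.pyGet? ws (-1)).getD ""))
          (fun w => (PySem.Str.len w : Int)) with
      | none => exact absurd ((PySem.List.max?_eq_none_iff _ _).mp hle) hnel
      | some le =>
      rw [loopMergeA_eq]
      have hpermS : ((PySem.List.sorted M (fun ws => (ws.length : Int)) false).map
            (fun ws => (PySem.List.pyGet? ws 0).getD "")).Perm
          (M.map (fun ws => (PySem.List.pyGet? ws 0).getD "")) :=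
        (PySem.List.sorted_perm M _ false).map _
      rw [foldMergeA_eq_of_max _ _ hpermS ls hls]
      have hpermE : ((PySem.List.sorted M (fun ws => (ws.length : Int)) false).map
            (fun ws => pyRev ((PySem.List.pyGet? ws (-1)).getD ""))).Perm
          ((M.map (fun ws => (PySem.List.pyGet? ws (-1)).getD "")).map pyRev) := by
        rw [List.map_map]
        exact (PySem.List.sorted_perm M _ false).map _
      have hLe : PySem.List.max?
          ((M.map (fun ws => (PySem.List.pyGet? ws (-1)).getD "")).map pyRev)
          (fun w => (PySem.Str.len w : Int)) = some (pyRev le) := by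
        rw [max?_map]
        rw [show (fun x => ((PySem.Str.len (pyRev x) : Int))) = (fun x => ((PySem.Str.len x : Int)))
          from funext (fun x => by rw [len_pyRev])]
        rw [hle]
        rfl
      rw [foldMergeA_eq_of_max _ _ hpermE (pyRev le) hLe]
      have hcondE : ((M.map (fun ws => (PySem.List.pyGet? ws (-1)).getD "")).map pyRev).all
            (fun w => PySem.Str.startswith (pyRev le) w) =
          (M.map (fun ws => (PySem.List.pyGet? ws (-1)).getD "")).all
            (fun w => PySem.Str.endswith le w) := by
        rw [List.all_map]
        have hcomp : ((fun w => PySem.Str.startswith (pyRev le) w) ∘ pyRev) =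
            (fun w => PySem.Str.endswith le w) := by
          funext w
          simp only [Function.comp_apply]
          exact startswith_pyRev_eq_endswith le w
        rw [hcomp]
      rw [hcondE]
      by_cases hc1 : (M.map (fun ws => (PySem.List.pyGet? ws 0).getD "")).all
          (fun w => PySem.Str.startswith ls w) = true
      · by_cases hc2 : (M.map (fun ws => (PySem.List.pyGet? ws (-1)).getD "")).all
            (fun w => PySem.Str.endswith le w) = true
        · rw [if_pos hc1, if_pos hc2]
          dsimp only
          rw [if_neg (not_not_intro hc1), if_neg (not_not_intro hc2), pyRev_pyRev,
            join_map_eq_join_flatMap]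
        · rw [if_pos hc1, if_neg hc2]
          dsimp only
          rw [if_neg (not_not_intro hc1), if_pos hc2]
      · rw [if_neg hc1]
        cases hx : (if (M.map (fun ws => (PySem.List.pyGet? ws (-1)).getD "")).all
            (fun w => PySem.Str.endswith le w) = true then some (pyRev le) else none) <;>
          · dsimp only
            rw [if_pos hc1]
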